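-- pv_equiv track=rewrite | github.com/itzilly/ProudCircle | discord-bot/src/util/mcign.py | is_valid_minecraft_username
-- ===== SOURCE A (Python) =====
-- def is_valid_minecraft_username(username):
-- 	"""https://help.mojang.com/customer/portal/articles/928638-minecraft-usernames"""
-- 	allowed_chars = 'abcdefghijklmnopqrstuvwxyz1234567890_'
-- 	allowed_len = [2, 16]
--
-- 	username = username.lower()
--
-- 	if len(username) < allowed_len[0] or len(username) > allowed_len[1]:
-- 		return False
--
-- 	for char in username:
-- 		if char not in allowed_chars:
-- 			return False
--
-- 	return True
-- ===== SOURCE B (Python) =====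
-- def is_valid_minecraft_username(username):
-- 	"""https://help.mojang.com/customer/portal/articles/928638-minecraft-usernames"""
-- 	def go(chars, n):
-- 		# single fused recursive pass: length bookkeeping and character
-- 		# validation together, aborting as soon as a 17th character is seen
-- 		if not chars:
-- 			return n >= 2
-- 		if n >= 16:
-- 			return False
-- 		c = chars[0]
-- 		if 'a' <= c <= 'z' or 'A' <= c <= 'Z' or '0' <= c <= '9' or c == '_':
-- 			return go(chars[1:], n + 1)
-- 		return False
-- 	return go(list(username), 0)
-- ===== Notes on version B (the rewrite author's own statement) =====
-- stated objective: alternative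
-- what changed: A lowercases the whole string, checks the length against a bounds list, then scans each char for membership in an alphabet string; B makes one fused recursive pass carrying a position counter that validates each character case-insensitively (no .lower(), no alphabet table, no separate length check) and aborts as soon as a 17th character is seen, accepting at the end iff at least 2 were consumed.
import Mathlib
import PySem

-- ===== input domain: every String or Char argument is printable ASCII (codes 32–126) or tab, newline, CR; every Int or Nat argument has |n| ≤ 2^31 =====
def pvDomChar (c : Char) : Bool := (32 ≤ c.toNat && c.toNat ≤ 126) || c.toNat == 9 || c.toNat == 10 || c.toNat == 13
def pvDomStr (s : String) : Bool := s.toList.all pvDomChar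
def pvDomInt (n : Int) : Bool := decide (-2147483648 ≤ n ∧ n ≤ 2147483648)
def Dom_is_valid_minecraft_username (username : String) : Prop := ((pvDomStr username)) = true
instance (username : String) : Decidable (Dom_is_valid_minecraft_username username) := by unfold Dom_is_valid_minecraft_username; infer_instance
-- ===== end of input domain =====

-- B replaces A's lowercase-then-length-check-then-membership-scan by one fused recursive
-- pass that validates characters case-insensitively while counting, aborting past 16 (alternative).

-- ===== PORT A =====
-- the for-loop with early 'return False': checks 'char in allowed_chars' (substring test) per char
def pvLoopA (allowed : List Char) : List Char → Bool
  | [] => true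
  | c :: rest => if !(PySem.Chars.isIn [c] allowed) then false else pvLoopA allowed rest

def is_valid_minecraft_username (username : String) : Bool :=
  let allowed_chars : String := "abcdefghijklmnopqrstuvwxyz1234567890_"
  let allowed_len : List Int := [2, 16]
  let u := PySem.Str.lower username
  if (PySem.Str.len u : Int) < PySem.List.pyGetD allowed_len 0 0
      || (PySem.Str.len u : Int) > PySem.List.pyGetD allowed_len 1 0 then false
  else pvLoopA allowed_chars.toList u.toList

-- ===== PORT B =====
-- the inner recursive helper go(chars, n) of Source B
def pvGoB : List Char → Nat → Bool
  | [], n => decide (2 ≤ n)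
  | c :: rest, n =>
    if 16 ≤ n then false
    else if ('a' ≤ c && c ≤ 'z') || ('A' ≤ c && c ≤ 'Z') || ('0' ≤ c && c ≤ '9') || c == '_' then
      pvGoB rest (n + 1)
    else false

def is_valid_minecraft_username_alt (username : String) : Bool :=
  pvGoB username.toList 0

-- ===== PRECONDITION & SPEC =====
def Spec_is_valid_minecraft_username (username : String) (out : Bool) : Prop := out = is_valid_minecraft_username_alt username
instance (username : String) (out : Bool) : Decidable (Spec_is_valid_minecraft_username username out) := by unfold Spec_is_valid_minecraft_username; infer_instance

-- ===== CLAIM (what is proved, stated in full; the proofs are below) =====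
def Claim_equal_is_valid_minecraft_username : Prop := ∀ (username : String), Dom_is_valid_minecraft_username username → Spec_is_valid_minecraft_username username (is_valid_minecraft_username username)

-- ===== LEMMAS AND PROOFS =====

-- lowering distributes over cons
theorem pv_lower_cons (c : Char) (cs : List Char) :
    PySem.Chars.lower (c :: cs) = PySem.Chars.lowerChar c :: PySem.Chars.lower cs := by
  simp [PySem.Chars.lower]

-- on a printable-ASCII char, B's case-insensitive range test equals A's membership
-- test of the lowered char in the alphabet string
theorem pv_char_eq (c : Char) (h : pvDomChar c = true) :
    (('a' ≤ c && c ≤ 'z') || ('A' ≤ c && c ≤ 'Z') || ('0' ≤ c && c ≤ '9') || c == '_')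
      = PySem.Chars.isIn [PySem.Chars.lowerChar c]
          "abcdefghijklmnopqrstuvwxyz1234567890_".toList := by
  have h126 : c.toNat ≤ 126 := by
    simp only [pvDomChar, Bool.or_eq_true, Bool.and_eq_true, decide_eq_true_eq,
      beq_iff_eq] at h
    omega
  have he := (Char.ofNat_toNat c).symm
  interval_cases h3 : c.toNat <;> rw [he] <;> decide

-- fused-pass invariant: with counter n ≤ 16 and Dom chars, B's recursion equals the
-- conjunction of A's length window and A's membership loop over the lowered chars
theorem pv_go_eq (cs : List Char) (n : Nat) (hn : n ≤ 16)
    (hd : ∀ c ∈ cs, pvDomChar c = true) :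
    pvGoB cs n =
      (decide (n + cs.length ≤ 16)
        && pvLoopA "abcdefghijklmnopqrstuvwxyz1234567890_".toList (PySem.Chars.lower cs)
        && decide (2 ≤ n + cs.length)) := by
  induction cs generalizing n with
  | nil =>
    simp only [pvGoB, List.length_nil, Nat.add_zero, PySem.Chars.lower, List.map_nil]
    simp [pvLoopA, hn]
  | cons c rest ih =>
    simp only [pvGoB, List.length_cons, pv_lower_cons, pvLoopA]
    by_cases h16 : 16 ≤ n
    · have : ¬ (n + (rest.length + 1) ≤ 16) := by omega
      simp [h16, this]
    · rw [if_neg h16]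
      have hc := pv_char_eq c (hd c (by simp))
      by_cases hok : (('a' ≤ c && c ≤ 'z') || ('A' ≤ c && c ≤ 'Z')
          || ('0' ≤ c && c ≤ '9') || c == '_') = true
      · have hin : PySem.Chars.isIn [PySem.Chars.lowerChar c]
            "abcdefghijklmnopqrstuvwxyz1234567890_".toList = true := by
          rw [← hc]; exact hok
        rw [if_pos hok, hin]
        rw [ih (n + 1) (by omega) (fun x hx => hd x (by simp [hx]))]
        have e1 : n + 1 + rest.length = n + (rest.length + 1) := by omega
        rw [e1]; simp; rfl
      · have hin : PySem.Chars.isIn [PySem.Chars.lowerChar c]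
            "abcdefghijklmnopqrstuvwxyz1234567890_".toList = false := by
          rw [← hc]; simpa using hok
        rw [if_neg hok, hin]
        simp

-- ===== VERDICT (by name: the statement is the Claim_ definition above) =====
theorem is_valid_minecraft_username_spec : Claim_equal_is_valid_minecraft_username := by
  intro username hdom
  unfold Spec_is_valid_minecraft_username is_valid_minecraft_username is_valid_minecraft_username_alt
  have hd : ∀ c ∈ username.toList, pvDomChar c = true := by
    have := hdom
    simpa [Dom_is_valid_minecraft_username, pvDomStr, List.all_eq_true] using this
  rw [pv_go_eq username.toList 0 (by omega) hd]
  simp only [PySem.Str.len_eq, PySem.Str.toList_lower]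
  have g0 : PySem.List.pyGetD [(2:Int),16] 0 0 = 2 := by decide
  have g1 : PySem.List.pyGetD [(2:Int),16] 1 0 = 16 := by decide
  rw [g0, g1]
  have hlen : (PySem.Chars.lower username.toList).length = username.toList.length := by
    simp [PySem.Chars.lower]
  rw [hlen]
  simp only [Nat.zero_add]
  set L := username.toList.length with hL
  by_cases hlo : ((L : Int) < 2 || (L : Int) > 16) = true
  · rw [if_pos hlo]
    simp only [Bool.or_eq_true, decide_eq_true_eq] at hlo
    rcases hlo with h | h
    · have hf : decide (2 ≤ L) = false := by
        simp only [decide_eq_false_iff_not]; omega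
      simp [hf]
    · have hf : decide (L ≤ 16) = false := by
        simp only [decide_eq_false_iff_not]; omega
      simp [hf]
  · rw [if_neg hlo]
    simp only [Bool.or_eq_true, decide_eq_true_eq, not_or, not_lt] at hlo
    obtain ⟨h2, h16⟩ := hlo
    have t1 : decide (L ≤ 16) = true := by
      simp only [decide_eq_true_eq]; omega
    have t2 : decide (2 ≤ L) = true := by
      simp only [decide_eq_true_eq]; omega
    simp [t1, t2]
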